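-- pv_equiv track=rewrite | github.com/AnkitAvi11/Data-Structures-And-Algorithms | Arrays/PerfectString.py | perfectString
-- ===== SOURCE A (Python) =====
-- from collections import Counter
--
-- def perfectString(string) :
--
--     counter = Counter(string)
--     string_len = len(string)
--     each_char_length = string_len//len(counter)
--
--     res = 0
--
--     for el in counter.keys() :
--         if not counter[el] == each_char_length :
--             res += abs(counter[el] // each_char_length)
--
--
--     return res
-- ===== SOURCE B (Python) =====
-- def perfectString(string):
--     # sort-then-scan: run lengths of the sorted string replace the Counter
--     s = sorted(string)
--     n = len(s)
--     lengths = []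
--     i = 0
--     while i < n:
--         j = i
--         while j < n and s[j] == s[i]:
--             j += 1
--         lengths.append(j - i)
--         i = j
--     each = len(string) // len(lengths)
--     res = 0
--     for c in lengths:
--         if c != each:
--             res += abs(c // each)
--     return res
-- ===== Notes on version B (the rewrite author's own statement) =====
-- stated objective: alternative
-- what changed: Replaces the hash-based Counter with sorting the string and scanning the sorted run lengths; the contribution loop runs over run lengths instead of dict keys.
-- outside the precondition, e.g. on perfectString(''): A raises ZeroDivisionError, B raises ZeroDivisionError
import Mathlib
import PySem

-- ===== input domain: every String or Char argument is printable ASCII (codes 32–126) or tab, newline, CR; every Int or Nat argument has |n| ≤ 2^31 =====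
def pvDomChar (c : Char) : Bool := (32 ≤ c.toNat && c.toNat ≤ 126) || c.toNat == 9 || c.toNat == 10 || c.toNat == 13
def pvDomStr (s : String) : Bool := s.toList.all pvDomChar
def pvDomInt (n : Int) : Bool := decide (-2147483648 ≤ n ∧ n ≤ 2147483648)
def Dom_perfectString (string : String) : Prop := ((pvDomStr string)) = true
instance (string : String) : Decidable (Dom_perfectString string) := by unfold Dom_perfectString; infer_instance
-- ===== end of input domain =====

-- B replaces the Counter hash map with sort-then-scan over run lengths (alternative decomposition, same results).

-- ===== PORT A =====
def perfectString (string : String) : Int :=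
  let counter := PySem.Dict.counter string.toList
  let string_len := PySem.Str.len string
  let each_char_length := PySem.Int.floordiv string_len (counter.size : Int)
  counter.keys.foldl (fun res el =>
    if ¬ (counter.getD el 0 = each_char_length) then
      res + |PySem.Int.floordiv (counter.getD el 0) each_char_length|
    else res) 0

-- ===== PORT B =====
-- the inner while loop of Source B: length of each maximal run of equal chars, left to right
def pvRunLengths : List Char → List Int
  | [] => []
  | a :: t =>
      ((t.takeWhile (fun x => x == a)).length + 1 : Int) ::
        pvRunLengths (t.dropWhile (fun x => x == a))
termination_by s => s.length
decreasing_by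
  simp only [List.length_cons]
  exact Nat.lt_succ_of_le (List.length_dropWhile_le _ _)

def perfectString_alt (string : String) : Int :=
  let lengths := pvRunLengths (PySem.List.sorted string.toList (fun c => c) false)
  let each := PySem.Int.floordiv (PySem.Str.len string) (lengths.length : Int)
  lengths.foldl (fun res c => if ¬ (c = each) then res + |PySem.Int.floordiv c each| else res) 0

-- ===== PRECONDITION & SPEC =====
-- Pre_ excludes only the empty string, on which both A and B raise ZeroDivisionError.
def Pre_perfectString (string : String) : Prop := string ≠ ""
instance (string : String) : Decidable (Pre_perfectString string) := by
  unfold Pre_perfectString; infer_instance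

def pvWitness_perfectString : String := "aab"

def Spec_perfectString (string : String) (out : Int) : Prop := out = perfectString_alt string
instance (string : String) (out : Int) : Decidable (Spec_perfectString string out) := by
  unfold Spec_perfectString; infer_instance

-- ===== CLAIM (what is proved, stated in full; the proofs are below) =====
def Claim_equal_perfectString : Prop := ∀ (string : String), Dom_perfectString string →
  Pre_perfectString string → Spec_perfectString string (perfectString string)

-- ===== LEMMAS AND PROOFS =====

-- a guarded accumulating foldl is init plus the sum of the guarded map
theorem pv_foldl_if_sum {α : Type} (p : α → Prop) [DecidablePred p] (f : α → Int) :
    ∀ (cs : List α) (init : Int),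
      cs.foldl (fun r c => if p c then r + f c else r) init
        = init + (cs.map (fun c => if p c then f c else 0)).sum := by
  intro cs
  induction cs with
  | nil => intro init; simp
  | cons a t ih =>
      intro init
      simp only [List.foldl_cons, List.map_cons, List.sum_cons, ih]
      split <;> ring

-- run lengths of a sorted list are a permutation of the counts of its distinct elements
theorem pv_runLengths_perm (s : List Char) (hs : s.Pairwise (· ≤ ·)) :
    (pvRunLengths s).Perm ((PySem.Set.ofList s).map (fun c => (s.count c : Int))) := by
  induction s using pvRunLengths.induct with
  | case1 => simp [pvRunLengths]
  | case2 a t ih =>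
      have hrun : ∀ x ∈ t.takeWhile (fun x => x == a), x = a := by
        intro x hx
        have := List.mem_takeWhile_imp hx
        simpa using this
      have ht : t = t.takeWhile (fun x => x == a) ++ t.dropWhile (fun x => x == a) :=
        (List.takeWhile_append_dropWhile).symm
      have hpt : t.Pairwise (· ≤ ·) := hs.of_cons
      have hat : ∀ x ∈ t, a ≤ x := fun x hx => (List.pairwise_cons.mp hs).1 x hx
      -- a does not occur in the dropped rest
      have hna : a ∉ t.dropWhile (fun x => x == a) := by
        intro hmem
        cases hrest : t.dropWhile (fun x => x == a) with
        | nil => simp [hrest] at hmem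
        | cons b r =>
            have hba : ¬ (b == a) = true := by
              have := List.dropWhile_get_zero_not (p := fun x => x == a) t (by simp [hrest])
              simpa [hrest] using this
            have hb : b ≠ a := by simpa using hba
            have hmem' : a ∈ t.dropWhile (fun x => x == a) := hmem
            rw [hrest] at hmem'
            rcases List.mem_cons.mp hmem' with h | h
            · exact hb h.symm
            · -- a ∈ r, but b ≤ a (pairwise on b :: r) and a ≤ b (a before b) force b = a
              have hsub : (t.dropWhile (fun x => x == a)).Pairwise (· ≤ ·) :=
                hpt.sublist (List.dropWhile_sublist _)
              rw [hrest] at hsub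
              have hba' : b ≤ a := (List.pairwise_cons.mp hsub).1 a h
              have hab : a ≤ b := by
                apply hat
                have : b ∈ t.dropWhile (fun x => x == a) := by rw [hrest]; exact List.mem_cons_self
                exact (List.dropWhile_sublist _).mem this
              exact hb (le_antisymm hba' hab)
      have hrestcount : ∀ c ∈ t.dropWhile (fun x => x == a),
          (a :: t).count c = (t.dropWhile (fun x => x == a)).count c := by
        intro c hc
        have hca : c ≠ a := fun h => hna (h ▸ hc)
        rw [List.count_cons_of_ne hca.symm]
        conv_lhs => rw [ht]
        rw [List.count_append]
        have : (t.takeWhile (fun x => x == a)).count c = 0 := by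
          rw [List.count_eq_zero]
          intro hcx
          exact hca (hrun c hcx)
        omega
      have hcounta : ((a :: t).count a : Int)
          = ((t.takeWhile (fun x => x == a)).length + 1 : Int) := by
        rw [List.count_cons_self]
        conv_lhs => rw [ht]
        rw [List.count_append]
        have h1 : (t.takeWhile (fun x => x == a)).count a
            = (t.takeWhile (fun x => x == a)).length := by
          rw [List.count_eq_length]
          intro x hx; exact ((hrun x hx) ▸ rfl)
        have h2 : (t.dropWhile (fun x => x == a)).count a = 0 :=
          List.count_eq_zero.mpr hna
        push_cast [h1, h2]
        ring
      -- the distinct elements: ofList (a :: t) is a permutation of a :: ofList rest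
      have hperm : (PySem.Set.ofList (a :: t)).Perm
          (a :: PySem.Set.ofList (t.dropWhile (fun x => x == a))) := by
        apply (List.perm_ext_iff_of_nodup (PySem.Set.nodup_ofList _) ?_).mpr
        · intro x
          simp only [PySem.Set.mem_ofList, List.mem_cons]
          constructor
          · rintro (h | h)
            · exact Or.inl h
            · conv at h => rw [ht]
              rcases List.mem_append.mp h with h | h
              · exact Or.inl (hrun x h)
              · exact Or.inr h
          · rintro (h | h)
            · exact Or.inl h
            · exact Or.inr ((List.dropWhile_sublist _).mem h)
        · exact List.nodup_cons.mpr ⟨by simpa using hna, PySem.Set.nodup_ofList _⟩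
      have hrest_sorted : (t.dropWhile (fun x => x == a)).Pairwise (· ≤ ·) :=
        hpt.sublist (List.dropWhile_sublist _)
      rw [pvRunLengths]
      refine ((ih hrest_sorted).cons ((t.takeWhile (fun x => x == a)).length + 1 : Int)).trans ?_
      have hmapr : (PySem.Set.ofList (t.dropWhile (fun x => x == a))).map
            (fun c => ((t.dropWhile (fun x => x == a)).count c : Int))
          = (PySem.Set.ofList (t.dropWhile (fun x => x == a))).map
            (fun c => ((a :: t).count c : Int)) := by
        apply List.map_congr_left
        intro c hc
        rw [hrestcount c ((PySem.Set.mem_ofList _ _).mp hc)]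
      rw [hmapr, ← hcounta]
      have hcons : ((a :: t).count a : Int) ::
            (PySem.Set.ofList (t.dropWhile (fun x => x == a))).map
              (fun c => ((a :: t).count c : Int))
          = (a :: PySem.Set.ofList (t.dropWhile (fun x => x == a))).map
              (fun c => ((a :: t).count c : Int)) := by simp
      rw [hcons]
      exact (hperm.map _).symm

-- ===== VERDICT (by name: the statement is the Claim_ definition above) =====
theorem perfectString_spec : Claim_equal_perfectString := by
  intro string _ _
  unfold Spec_perfectString perfectString perfectString_alt
  simp only []
  set l := string.toList with hl
  set s := PySem.List.sorted l (fun c => c) false with hsdef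
  have hsp : s.Perm l := PySem.List.sorted_perm l (fun c => c) false
  have hsorted : s.Pairwise (· ≤ ·) := by
    have := PySem.List.sorted_pairwise (xs := l) (key := fun c => c)
    simpa using this
  have hmain := pv_runLengths_perm s hsorted
  -- transport counts and membership from s to l
  have hcount : ∀ c, s.count c = l.count c := fun c => hsp.count_eq c
  have hofperm : (PySem.Set.ofList s).Perm (PySem.Set.ofList l) := by
    apply (List.perm_ext_iff_of_nodup (PySem.Set.nodup_ofList _)
      (PySem.Set.nodup_ofList _)).mpr
    intro x
    simp only [PySem.Set.mem_ofList]
    exact ⟨fun h => hsp.mem_iff.mp h, fun h => hsp.mem_iff.mpr h⟩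
  have hmain' : (pvRunLengths s).Perm
      ((PySem.Set.ofList l).map (fun c => (l.count c : Int))) := by
    refine hmain.trans ?_
    have h1 : (PySem.Set.ofList s).map (fun c => (s.count c : Int))
        = (PySem.Set.ofList s).map (fun c => (l.count c : Int)) := by
      apply List.map_congr_left; intro c _; rw [hcount]
    rw [h1]
    exact hofperm.map _
  -- keys and size of the counter
  have hkeys : (PySem.Dict.counter l).keys = PySem.Set.ofList l :=
    PySem.Dict.keys_counter l
  have hsize : (PySem.Dict.counter l).size = (PySem.Set.ofList l).length := by
    have : (PySem.Dict.counter l).keys.length = (PySem.Set.ofList l).length := by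
      rw [hkeys]
    simpa [PySem.Dict.keys, PySem.Dict.size] using this
  have hlen : (pvRunLengths s).length = (PySem.Set.ofList l).length := by
    simpa using hmain'.length_eq
  -- both divisors coincide
  set each : Int := PySem.Int.floordiv (PySem.Str.len string) ((PySem.Set.ofList l).length : Int)
    with heach
  rw [hsize, hlen]
  rw [pv_foldl_if_sum (fun el => ¬ ((PySem.Dict.counter l).getD el 0 = each))
        (fun el => |PySem.Int.floordiv ((PySem.Dict.counter l).getD el 0) each|),
      pv_foldl_if_sum (fun c => ¬ (c = each)) (fun c => |PySem.Int.floordiv c each|)]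
  rw [hkeys]
  have hgetD : ∀ c, (PySem.Dict.counter l).getD c 0 = (l.count c : Int) := fun c =>
    PySem.Dict.getD_counter l c
  have hA : (PySem.Set.ofList l).map
        (fun el => if ¬ ((PySem.Dict.counter l).getD el 0 = each) then
          |PySem.Int.floordiv ((PySem.Dict.counter l).getD el 0) each| else 0)
      = ((PySem.Set.ofList l).map (fun c => (l.count c : Int))).map
        (fun x => if ¬ (x = each) then |PySem.Int.floordiv x each| else 0) := by
    rw [List.map_map]
    apply List.map_congr_left
    intro c _
    simp only [Function.comp, hgetD]
  have hB : (pvRunLengths s).map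
        (fun c => if ¬ (c = each) then |PySem.Int.floordiv c each| else 0)
      = (pvRunLengths s).map
        (fun x => if ¬ (x = each) then |PySem.Int.floordiv x each| else 0) := rfl
  rw [hA, hB]
  exact congrArg (0 + ·) ((hmain'.map _).sum_eq).symm
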